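-- pv_equiv track=rewrite | github.com/costadanilofreitas/pos-structure | src/_comps/new-production/src/production/model/__init__.py | create_states_from_state
-- ===== SOURCE A (Python) =====
-- def create_states_from_state(state):
--     state_order = ["IN_PROGRESS", "STORED", "TOTALED", "PAID", "VOIDED", "ABANDONED"]
--
--     states = []
--
--     try:
--         index = state_order.index(state)
--         for state in state_order[index:]:
--             states.append(state)
--     except ValueError:
--         pass
--
--     return states
-- ===== SOURCE B (Python) =====
-- def create_states_from_state(state):
--     state_order = ["IN_PROGRESS", "STORED", "TOTALED", "PAID", "VOIDED", "ABANDONED"]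
--     found = False
--     states = []
--     for s in state_order:
--         if s == state:
--             found = True
--         if found:
--             states.append(s)
--     return states
-- ===== Notes on version B (the rewrite author's own statement) =====
-- stated objective: simpler
-- what changed: Replaced the index()-then-slice-copy with try/except by a single flag-collecting pass: set found when the element equals state and append while found; an absent state naturally yields [] with no exception handling.
import Mathlib
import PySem

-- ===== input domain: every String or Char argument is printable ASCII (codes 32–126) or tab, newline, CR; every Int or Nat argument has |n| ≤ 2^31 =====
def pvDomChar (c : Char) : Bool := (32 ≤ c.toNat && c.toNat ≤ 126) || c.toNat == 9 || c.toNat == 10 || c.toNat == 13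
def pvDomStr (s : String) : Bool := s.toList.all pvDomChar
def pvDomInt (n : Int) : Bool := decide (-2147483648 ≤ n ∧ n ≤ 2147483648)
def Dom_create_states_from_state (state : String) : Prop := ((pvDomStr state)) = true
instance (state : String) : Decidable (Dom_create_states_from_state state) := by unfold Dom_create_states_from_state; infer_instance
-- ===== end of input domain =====

-- B replaces A's index()-then-slice copy with try/except by a single flag-collecting pass (simpler decomposition).


-- ===== PORT A =====
def create_states_from_state (state : String) : List String :=
  let state_order := ["IN_PROGRESS", "STORED", "TOTALED", "PAID", "VOIDED", "ABANDONED"]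
  let states : List String := []
  match PySem.List.index? state_order state with
  | some index =>
      (PySem.List.slice state_order (some (index : Int)) none).foldl
        (fun acc s => acc ++ [s]) states
  | none => states

-- ===== PORT B =====
def create_states_from_state_alt (state : String) : List String :=
  let state_order := ["IN_PROGRESS", "STORED", "TOTALED", "PAID", "VOIDED", "ABANDONED"]
  (state_order.foldl
    (fun (p : Bool × List String) s =>
      let found := if s == state then true else p.1
      (found, if found then p.2 ++ [s] else p.2))
    (false, [])).2

-- ===== PRECONDITION & SPEC =====
def Spec_create_states_from_state (state : String) (out : List String) : Prop := out = create_states_from_state_alt state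
instance (state : String) (out : List String) : Decidable (Spec_create_states_from_state state out) := by unfold Spec_create_states_from_state; infer_instance

-- ===== CLAIM (what is proved, stated in full; the proofs are below) =====
def Claim_equal_create_states_from_state : Prop := ∀ (state : String), Dom_create_states_from_state state → Spec_create_states_from_state state (create_states_from_state state)

-- ===== LEMMAS AND PROOFS =====

-- ===== VERDICT (by name: the statement is the Claim_ definition above) =====
theorem create_states_from_state_spec : Claim_equal_create_states_from_state := by
  intro state _
  unfold Spec_create_states_from_state
  by_cases h1 : state = "IN_PROGRESS"; · subst h1; decide
  by_cases h2 : state = "STORED"; · subst h2; decide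
  by_cases h3 : state = "TOTALED"; · subst h3; decide
  by_cases h4 : state = "PAID"; · subst h4; decide
  by_cases h5 : state = "VOIDED"; · subst h5; decide
  by_cases h6 : state = "ABANDONED"; · subst h6; decide
  have hmem : state ∉ (["IN_PROGRESS", "STORED", "TOTALED", "PAID", "VOIDED", "ABANDONED"] : List String) := by
    simp [h1, h2, h3, h4, h5, h6]
  have hni : PySem.List.index? (["IN_PROGRESS", "STORED", "TOTALED", "PAID", "VOIDED", "ABANDONED"] : List String) state = none :=
    (PySem.List.index?_eq_none_iff _ _).mpr hmem
  simp only [create_states_from_state, hni]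
  simp [create_states_from_state_alt,
    Ne.symm h1, Ne.symm h2, Ne.symm h3, Ne.symm h4, Ne.symm h5, Ne.symm h6]
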